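-- pv_equiv track=rewrite | github.com/AgenticRevolution/memory-marketplace | hats/seeds/devops/seed.py | _find_memory
-- ===== SOURCE A (Python) =====
-- def _find_memory(memory_map: dict, keyword: str) -> str:
--     """Find a memory ID by matching keyword against content keys."""
--     # Exact prefix match first
--     for key, mem_id in memory_map.items():
--         if keyword in key:
--             return mem_id
--     # Fuzzy: check if keyword appears anywhere in stored keys
--     keyword_lower = keyword.lower()
--     for key, mem_id in memory_map.items():
--         if keyword_lower in key.lower():
--             return mem_id
--     return None
-- ===== SOURCE B (Python) =====
-- def _find_memory(memory_map: dict, keyword: str) -> str: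
--     """Find a memory ID by matching keyword against content keys (single pass)."""
--     keyword_lower = keyword.lower()
--     fallback = None
--     for key, mem_id in memory_map.items():
--         if keyword in key:
--             return mem_id
--         if fallback is None and keyword_lower in key.lower():
--             fallback = mem_id
--     return fallback
-- ===== Notes on version B (the rewrite author's own statement) =====
-- stated objective: alternative
-- what changed: Merges A's two sequential scans into one pass that returns a case-sensitive match immediately and keeps the first case-insensitive match as a fallback accumulator.
import Mathlib
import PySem

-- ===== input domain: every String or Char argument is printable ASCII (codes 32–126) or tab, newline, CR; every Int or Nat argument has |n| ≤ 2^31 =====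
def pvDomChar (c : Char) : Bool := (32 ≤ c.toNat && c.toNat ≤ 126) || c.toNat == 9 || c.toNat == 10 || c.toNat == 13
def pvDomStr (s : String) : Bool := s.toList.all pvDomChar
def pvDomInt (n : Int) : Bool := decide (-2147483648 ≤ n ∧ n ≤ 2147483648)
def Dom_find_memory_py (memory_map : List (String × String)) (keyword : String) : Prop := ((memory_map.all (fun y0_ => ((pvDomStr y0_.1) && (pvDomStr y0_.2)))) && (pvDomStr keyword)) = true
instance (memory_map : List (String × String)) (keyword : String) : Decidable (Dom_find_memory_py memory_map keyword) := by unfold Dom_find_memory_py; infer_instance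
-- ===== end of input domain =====

-- B merges A's two sequential scans into a single pass with a fallback accumulator; same result, same cost (alternative decomposition).


-- ===== PORT A =====
-- first loop: exact (case-sensitive) substring match
def pvAExact (memory_map : List (String × String)) (keyword : String) : Option String :=
  match memory_map with
  | [] => none
  | (key, mem_id) :: rest =>
    if PySem.Str.isIn keyword key then some mem_id else pvAExact rest keyword

-- second loop: fuzzy (case-insensitive) match, given the already-lowered keyword
def pvAFuzzy (memory_map : List (String × String)) (keyword_lower : String) : Option String :=
  match memory_map with
  | [] => none
  | (key, mem_id) :: rest =>
    if PySem.Str.isIn keyword_lower (PySem.Str.lower key) then some mem_id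
    else pvAFuzzy rest keyword_lower

def find_memory_py (memory_map : List (String × String)) (keyword : String) : Option String :=
  match pvAExact memory_map keyword with
  | some mem_id => some mem_id
  | none => pvAFuzzy memory_map (PySem.Str.lower keyword)

-- ===== PORT B =====
-- single pass: return exact match at once, record first fuzzy match as fallback
def pvBLoop (memory_map : List (String × String)) (keyword keyword_lower : String)
    (fallback : Option String) : Option String :=
  match memory_map with
  | [] => fallback
  | (key, mem_id) :: rest =>
    if PySem.Str.isIn keyword key then some mem_id
    else
      pvBLoop rest keyword keyword_lower
        (if fallback.isNone && PySem.Str.isIn keyword_lower (PySem.Str.lower key)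
         then some mem_id else fallback)

def find_memory_py_alt (memory_map : List (String × String)) (keyword : String) : Option String :=
  pvBLoop memory_map keyword (PySem.Str.lower keyword) none

-- ===== PRECONDITION & SPEC =====
def Spec_find_memory_py (memory_map : List (String × String)) (keyword : String) (out : Option String) : Prop := out = find_memory_py_alt memory_map keyword
instance (memory_map : List (String × String)) (keyword : String) (out : Option String) : Decidable (Spec_find_memory_py memory_map keyword out) := by unfold Spec_find_memory_py; infer_instance

-- ===== CLAIM (what is proved, stated in full; the proofs are below) =====
def Claim_equal_find_memory_py : Prop := ∀ (memory_map : List (String × String)) (keyword : String), Dom_find_memory_py memory_map keyword → Spec_find_memory_py memory_map keyword (find_memory_py memory_map keyword)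

-- ===== LEMMAS AND PROOFS =====
-- invariant of B's single pass: exact match wins, else the fallback, else A's fuzzy scan
theorem pvBLoop_eq (l : List (String × String)) (kw kwl : String) (fb : Option String) :
    pvBLoop l kw kwl fb =
      match pvAExact l kw with
      | some v => some v
      | none => match fb with
                | some x => some x
                | none => pvAFuzzy l kwl := by
  induction l generalizing fb with
  | nil => cases fb <;> simp [pvBLoop, pvAExact, pvAFuzzy]
  | cons p rest ih =>
    obtain ⟨key, mem_id⟩ := p
    simp only [pvBLoop, pvAExact, pvAFuzzy]
    by_cases h1 : PySem.Str.isIn kw key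
    · simp [PySem.Str.isIn] at h1; simp [h1]
    · simp [PySem.Str.isIn] at h1
      simp only [PySem.Str.isIn, PySem.Str.lower, h1, ih]
      cases fb <;> by_cases h2 : PySem.Chars.isIn kwl.toList (PySem.Chars.lower key.toList) <;>
        simp [h2]

-- ===== VERDICT (by name: the statement is the Claim_ definition above) =====
theorem find_memory_py_spec : Claim_equal_find_memory_py := by
  intro mm kw _
  unfold Spec_find_memory_py find_memory_py find_memory_py_alt
  rw [pvBLoop_eq]
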